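-- pv_equiv track=rewrite | github.com/brandon3096/Keyword-Extractor | preprocess.py | removeSGML
-- ===== SOURCE A (Python) =====
-- def removeSGML(string):
--
--     i = 0
--
--     while i in range(0,len(string)):
--         if(string[i] == '<'):
--             marker = 1
--             for j in range(i+1, len(string)):
--                 if(string[j] == '<'):
--                     marker = marker + 1
--                 elif(string[j] == '>'):
--                     if(marker == 1):
--                         string = string[:i] + string[j+1:]
--                         i = -1
--                         break
--                     marker = marker - 1
--         i = i + 1
--
--     return string
-- ===== SOURCE B (Python) =====
-- def removeSGML(string):
--     stack = []
--     buf = []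
--     for c in string:
--         if c == '<':
--             stack.append(buf)
--             buf = []
--         elif c == '>':
--             if stack:
--                 buf = stack.pop()
--             else:
--                 buf.append(c)
--         else:
--             buf.append(c)
--     for seg in reversed(stack):
--         buf = seg + ['<'] + buf
--     return ''.join(buf)
-- ===== Notes on version B (the rewrite author's own statement) =====
-- stated objective: faster
-- what changed: A repeatedly rescans from the start of the string, splicing out one matched bracket segment per pass; B makes a single left-to-right pass keeping a stack of output buffers (push at an opening bracket, discard-and-pop at its matching closing bracket), then stitches the unmatched-opener segments back together.
import Mathlib
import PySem

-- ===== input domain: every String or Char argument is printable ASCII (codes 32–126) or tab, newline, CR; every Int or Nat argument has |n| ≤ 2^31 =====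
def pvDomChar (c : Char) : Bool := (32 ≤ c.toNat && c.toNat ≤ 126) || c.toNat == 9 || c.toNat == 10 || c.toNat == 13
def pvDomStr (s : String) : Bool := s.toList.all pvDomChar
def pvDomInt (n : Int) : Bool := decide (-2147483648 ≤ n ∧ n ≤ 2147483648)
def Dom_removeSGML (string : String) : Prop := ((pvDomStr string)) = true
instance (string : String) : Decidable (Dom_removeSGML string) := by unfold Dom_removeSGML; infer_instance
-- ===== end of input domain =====

-- B replaces A's quadratic rescan-from-the-start removal loop with one linear pass
-- keeping a stack of output buffers (objective: faster, asymptotic).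

-- ===== PORT A =====
-- A's inner `for j in range(i+1, len(string))` loop: scan for the '>' matching the
-- '<' at i, counting nesting in `marker`; returns the j at which A breaks, if any.
-- (`fuel` only makes the loop structurally total; it starts at the loop's exact trip count.)
def fmGoAux : Nat → List Char → Nat → Int → Option Nat
  | 0, _, _, _ => none
  | fuel+1, s, j, m =>
    if h : j < s.length then
      if s[j] = '<' then fmGoAux fuel s (j+1) (m+1)
      else if s[j] = '>' then
        if m = 1 then some j else fmGoAux fuel s (j+1) (m-1)
      else fmGoAux fuel s (j+1) m
    else none

def fmGo (s : List Char) (j : Nat) (m : Int) : Option Nat := fmGoAux (s.length - j) s j m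

-- A's outer `while i in range(0, len(string))` loop; on a match A sets
-- string = string[:i] + string[j+1:], i = -1, and `i = i + 1` restarts at 0.
-- (`fuel` again only bounds the iteration count; (|s|+1)² iterations always suffice.)
def aLoopAux : Nat → List Char → Nat → List Char
  | 0, s, _ => s
  | fuel+1, s, i =>
    if h : i < s.length then
      if s[i] = '<' then
        match fmGo s (i+1) 1 with
        | some j => aLoopAux fuel (s.take i ++ s.drop (j+1)) 0
        | none => aLoopAux fuel s (i+1)
      else aLoopAux fuel s (i+1)
    else s

def removeSGML (string : String) : String :=
  String.ofList (aLoopAux ((string.toList.length + 1) * (string.toList.length + 1)) string.toList 0)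

-- ===== PORT B =====
-- one step of B's `for c in string` loop; state = (stack of buffers, current buffer)
def stepB (p : List (List Char) × List Char) (c : Char) : List (List Char) × List Char :=
  if c = '<' then (p.2 :: p.1, [])
  else if c = '>' then
    match p.1 with
    | b :: st => (st, b)
    | [] => (p.1, p.2 ++ [c])
  else (p.1, p.2 ++ [c])

-- B's final `for seg in reversed(stack): buf = seg + ['<'] + buf`
def assembleB : List (List Char) → List Char → List Char
  | [], buf => buf
  | b :: st, buf => assembleB st (b ++ '<' :: buf)

def removeSGML_alt (string : String) : String :=
  let p := string.toList.foldl stepB ([], [])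
  String.ofList (assembleB p.1 p.2)

-- ===== PRECONDITION & SPEC =====
def Spec_removeSGML (string : String) (out : String) : Prop := out = removeSGML_alt string
instance (string : String) (out : String) : Decidable (Spec_removeSGML string out) := by unfold Spec_removeSGML; infer_instance

-- ===== CLAIM (what is proved, stated in full; the proofs are below) =====
def Claim_equal_removeSGML : Prop := ∀ (string : String), Dom_removeSGML string → Spec_removeSGML string (removeSGML string)

-- ===== LEMMAS AND PROOFS =====

-- `finB` reassembles B's final state into the output list
def finB (p : List (List Char) × List Char) : List Char := assembleB p.1 p.2

-- structural version of A's inner scan, on the suffix of the string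
def fmGoL : List Char → Int → Option Nat
  | [], _ => none
  | c :: r, m =>
    if c = '<' then (fmGoL r (m+1)).map (· + 1)
    else if c = '>' then (if m = 1 then some 0 else (fmGoL r (m-1)).map (· + 1))
    else (fmGoL r m).map (· + 1)

-- depth counter for balanced bracket segments
def balI : List Char → Int → Bool
  | [], d => d == 0
  | c :: r, d =>
    if c = '<' then balI r (d+1)
    else if c = '>' then (decide (0 < d)) && balI r (d-1)
    else balI r d

theorem fmGoAux_eq (fuel : Nat) (s : List Char) (j : Nat) (m : Int)
    (hf : s.length - j ≤ fuel) :
    fmGoAux fuel s j m = (fmGoL (s.drop j) m).map (· + j) := by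
  induction fuel generalizing j m with
  | zero =>
    rw [List.drop_eq_nil_of_le (by omega)]
    simp [fmGoAux, fmGoL]
  | succ fuel ih =>
    rw [fmGoAux]
    by_cases hj : j < s.length
    · rw [dif_pos hj]
      have hd : s.drop j = s[j] :: s.drop (j+1) := List.drop_eq_getElem_cons hj
      rw [hd, fmGoL]
      by_cases h1 : s[j] = '<'
      · rw [if_pos h1, if_pos h1, ih (j+1) (m+1) (by omega), Option.map_map]
        congr 1; funext x; simp; omega
      · rw [if_neg h1, if_neg h1]
        by_cases h2 : s[j] = '>'
        · rw [if_pos h2, if_pos h2]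
          by_cases h3 : m = 1
          · rw [if_pos h3, if_pos h3]; simp
          · rw [if_neg h3, if_neg h3, ih (j+1) (m-1) (by omega), Option.map_map]
            congr 1; funext x; simp; omega
        · rw [if_neg h2, if_neg h2, ih (j+1) m (by omega), Option.map_map]
          congr 1; funext x; simp; omega
    · rw [dif_neg hj, List.drop_eq_nil_of_le (Nat.le_of_not_lt hj)]
      simp [fmGoL]

theorem fmGo_eq_fmGoL (s : List Char) (j : Nat) (m : Int) :
    fmGo s j m = (fmGoL (s.drop j) m).map (· + j) := fmGoAux_eq _ s j m le_rfl

theorem fmGoL_some (l : List Char) (m : Int) (k : Nat) (hm : 1 ≤ m)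
    (h : fmGoL l m = some k) :
    ∃ v w, l = v ++ '>' :: w ∧ v.length = k ∧ balI v (m - 1) = true := by
  induction l generalizing m k with
  | nil => simp [fmGoL] at h
  | cons c r ih =>
    rw [fmGoL] at h
    by_cases h1 : c = '<'
    · rw [if_pos h1] at h
      obtain ⟨k0, hk0, rfl⟩ := Option.map_eq_some_iff.mp h
      obtain ⟨v, w, rfl, hlen, hbal⟩ := ih (m+1) k0 (by omega) hk0
      refine ⟨c :: v, w, rfl, by simp [hlen], ?_⟩
      rw [balI, if_pos h1]
      have : m - 1 + 1 = m + 1 - 1 := by omega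
      rw [this]; exact hbal
    · rw [if_neg h1] at h
      by_cases h2 : c = '>'
      · rw [if_pos h2] at h
        by_cases h3 : m = 1
        · rw [if_pos h3] at h
          simp only [Option.some.injEq] at h
          exact ⟨[], r, by rw [h2]; rfl, by simpa using h, by simp [balI]; omega⟩
        · rw [if_neg h3] at h
          obtain ⟨k0, hk0, rfl⟩ := Option.map_eq_some_iff.mp h
          obtain ⟨v, w, rfl, hlen, hbal⟩ := ih (m-1) k0 (by omega) hk0
          refine ⟨c :: v, w, rfl, by simp [hlen], ?_⟩
          rw [balI, if_neg h1, if_pos h2]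
          have h4 : (0 < m - 1) := by omega
          simp only [h4, decide_true, Bool.true_and]
          have : m - 1 - 1 = m - 1 - 1 := rfl
          convert hbal using 2
      · rw [if_neg h2] at h
        obtain ⟨k0, hk0, rfl⟩ := Option.map_eq_some_iff.mp h
        obtain ⟨v, w, rfl, hlen, hbal⟩ := ih m k0 hm hk0
        refine ⟨c :: v, w, rfl, by simp [hlen], ?_⟩
        rw [balI, if_neg h1, if_neg h2]; exact hbal

theorem fmGoL_clean (m' : List Char) (hlt : '<' ∉ m') (hgt : '>' ∉ m') (w : List Char) :
    fmGoL (m' ++ '>' :: w) 1 = some m'.length := by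
  induction m' with
  | nil => simp [fmGoL]
  | cons c r ih =>
    have h1 : c ≠ '<' := fun h => hlt (h ▸ List.mem_cons_self ..)
    have h2 : c ≠ '>' := fun h => hgt (h ▸ List.mem_cons_self ..)
    rw [List.cons_append, fmGoL, if_neg h1, if_neg h2,
      ih (fun h => hlt (List.mem_cons_of_mem _ h)) (fun h => hgt (List.mem_cons_of_mem _ h))]
    simp

theorem bal_fold (v : List Char) (ls st : List (List Char)) (buf : List Char)
    (h : balI v (ls.length : Int) = true) :
    ∃ buf', List.foldl stepB (ls ++ st, buf) v = (st, buf') := by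
  induction v generalizing ls buf with
  | nil =>
    rw [balI] at h
    have : ls = [] := List.eq_nil_of_length_eq_zero (by simpa using h)
    exact ⟨buf, by simp [this]⟩
  | cons c r ih =>
    rw [balI] at h
    by_cases h1 : c = '<'
    · rw [if_pos h1] at h
      have hstep : stepB (ls ++ st, buf) c = ((buf :: ls) ++ st, []) := by
        simp [stepB, h1]
      rw [List.foldl_cons, hstep]
      exact ih (buf :: ls) [] (by simpa using h)
    · rw [if_neg h1] at h
      by_cases h2 : c = '>'
      · rw [if_pos h2] at h
        obtain ⟨hpos, hbal⟩ := Bool.and_eq_true_iff.mp h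
        have hls : ls ≠ [] := by
          intro he; rw [he] at hpos; simp at hpos
        obtain ⟨b, ls', rfl⟩ := List.exists_cons_of_ne_nil hls
        have hstep : stepB ((b :: ls') ++ st, buf) c = (ls' ++ st, b) := by
          simp [stepB, h2]
        rw [List.foldl_cons, hstep]
        refine ih ls' b ?_
        have : (ls'.length : Int) = (b :: ls').length - 1 := by simp
        rw [this]; exact hbal
      · rw [if_neg h2] at h
        have hstep : stepB (ls ++ st, buf) c = (ls ++ st, buf ++ [c]) := by
          simp [stepB, h1, h2]
        rw [List.foldl_cons, hstep]
        exact ih ls (buf ++ [c]) h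

theorem seg_fold (v : List Char) (hv : balI v 0 = true) (st : List (List Char))
    (buf w : List Char) :
    List.foldl stepB (st, buf) ('<' :: (v ++ '>' :: w)) = List.foldl stepB (st, buf) w := by
  rw [List.foldl_cons]
  have hstep : stepB (st, buf) '<' = (buf :: st, []) := by simp [stepB]
  rw [hstep]
  have hsplit : v ++ '>' :: w = (v ++ ['>']) ++ w := by simp
  rw [hsplit, List.foldl_append, List.foldl_append]
  obtain ⟨buf', hfold⟩ := bal_fold v [] (buf :: st) [] (by simpa using hv)
  simp only [List.nil_append] at hfold
  rw [hfold]
  simp [stepB]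

theorem nolt_fold (u : List Char) (hu : '<' ∉ u) (buf : List Char) :
    List.foldl stepB ([], buf) u = ([], buf ++ u) := by
  induction u generalizing buf with
  | nil => simp
  | cons c r ih =>
    have h1 : c ≠ '<' := fun h => hu (h ▸ List.mem_cons_self ..)
    have hstep : stepB (([] : List (List Char)), buf) c = ([], buf ++ [c]) := by
      unfold stepB; rw [if_neg h1]; split <;> rfl
    rw [List.foldl_cons, hstep, ih (fun h => hu (List.mem_cons_of_mem _ h))]
    simp

theorem nogt_fold (v : List Char) (hv : '>' ∉ v) (st : List (List Char)) (buf : List Char) :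
    finB (List.foldl stepB (st, buf) v) = assembleB st (buf ++ v) := by
  induction v generalizing st buf with
  | nil => simp [finB]
  | cons c r ih =>
    have h2 : c ≠ '>' := fun h => hv (h ▸ List.mem_cons_self ..)
    have hr : '>' ∉ r := fun h => hv (List.mem_cons_of_mem _ h)
    by_cases h1 : c = '<'
    · have hstep : stepB (st, buf) c = (buf :: st, []) := by simp [stepB, h1]
      rw [List.foldl_cons, hstep, ih hr, h1]
      simp [assembleB]
    · have hstep : stepB (st, buf) c = (st, buf ++ [c]) := by simp [stepB, h1, h2]
      rw [List.foldl_cons, hstep, ih hr]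
      simp

theorem shrink (mm u w : List Char) :
    ∃ u' m' w', u ++ '<' :: mm ++ '>' :: w = u' ++ '<' :: m' ++ '>' :: w' ∧
      '<' ∉ m' ∧ '>' ∉ m' := by
  by_cases h1 : '<' ∈ mm
  · obtain ⟨m1, m2, hmm⟩ := List.append_of_mem h1
    have hd : m2.length < mm.length := by rw [hmm]; simp; omega
    obtain ⟨u', m', w', heq, hl, hg⟩ := shrink m2 (u ++ '<' :: m1) w
    exact ⟨u', m', w', by rw [hmm, ← heq]; simp, hl, hg⟩
  · by_cases h2 : '>' ∈ mm
    · obtain ⟨m1, m2, hmm⟩ := List.append_of_mem h2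
      have hd : m1.length < mm.length := by rw [hmm]; simp
      obtain ⟨u', m', w', heq, hl, hg⟩ := shrink m1 u (m2 ++ '>' :: w)
      exact ⟨u', m', w', by rw [hmm, ← heq]; simp, hl, hg⟩
    · exact ⟨u, mm, w, rfl, h1, h2⟩
termination_by mm.length
decreasing_by
  all_goals omega

theorem main_equiv (fuel : Nat) (s : List Char) (i : Nat)
    (hfuel : (s.length + 1) * (s.length + 1) - i ≤ fuel) (hile : i ≤ s.length)
    (hinv : ∀ u r, s = u ++ '<' :: r → u.length < i → fmGoL r 1 = none) :
    aLoopAux fuel s i = finB (List.foldl stepB ([], []) s) := by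
  induction fuel generalizing s i with
  | zero =>
    exfalso
    have hsq : s.length + 1 ≤ (s.length + 1) * (s.length + 1) :=
      Nat.le_mul_of_pos_right _ (Nat.succ_pos _)
    omega
  | succ fuel ih =>
    rw [aLoopAux]
    split
    next hi =>
      split
      next hc =>
        split
        next j heq =>
          rw [fmGo_eq_fmGoL] at heq
          obtain ⟨k, hk, hj⟩ := Option.map_eq_some_iff.mp heq
          obtain ⟨v, w, hdec, hvlen, hbal⟩ := fmGoL_some _ 1 k le_rfl hk
          have hs : s = s.take i ++ '<' :: (v ++ '>' :: w) := by
            conv_lhs => rw [← List.take_append_drop i s]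
            rw [List.drop_eq_getElem_cons hi, hc, hdec]
          have hw : s.drop (j+1) = w := by
            rw [show j + 1 = (i+1) + (k+1) by omega, ← List.drop_drop, hdec,
              show v ++ '>' :: w = (v ++ ['>']) ++ w by simp,
              List.drop_left' (by simp [hvlen])]
          have hslen := congrArg List.length hs
          simp only [List.length_append, List.length_take, List.length_cons] at hslen
          have hlen : (s.take i ++ s.drop (j+1)).length < s.length := by
            rw [hw]; simp only [List.length_append, List.length_take]; omega
          have hfu : ((s.take i ++ s.drop (j+1)).length + 1) * ((s.take i ++ s.drop (j+1)).length + 1) - 0 ≤ fuel := by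
            have h1 : (s.take i ++ s.drop (j+1)).length + 1 ≤ s.length := hlen
            have h2 := Nat.mul_le_mul h1 h1
            have h3 : s.length * s.length + 2 * s.length + 1 = (s.length+1)*(s.length+1) := by ring
            omega
          rw [ih (s.take i ++ s.drop (j+1)) 0 hfu (by omega) (fun u r _ hu => absurd hu (by omega))]
          rw [hw]
          conv_rhs => rw [hs]
          rw [List.foldl_append, List.foldl_append, seg_fold v hbal]
        next heq =>
          rw [fmGo_eq_fmGoL, Option.map_eq_none_iff] at heq
          refine ih s (i+1) (by omega) (by omega) (fun u r hur hu => ?_)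
          rcases Nat.lt_or_ge u.length i with hlt | hge
          · exact hinv u r hur hlt
          · have hui : u.length = i := by omega
            have hr : s.drop (i+1) = r := by
              rw [hur, ← hui, show u ++ '<' :: r = (u ++ ['<']) ++ r by simp,
                List.drop_left' (by simp)]
            rw [← hr]; exact heq
      next hc =>
        refine ih s (i+1) (by omega) (by omega) (fun u r hur hu => ?_)
        rcases Nat.lt_or_ge u.length i with hlt | hge
        · exact hinv u r hur hlt
        · exfalso
          have hui : u.length = i := by omega
          have h1 : s[i]? = some '<' := by
            rw [hur, ← hui]; simp
          rw [List.getElem?_eq_getElem hi] at h1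
          simp only [Option.some.injEq] at h1
          exact hc h1
    next hi =>
      have hnd : ∀ u mm w2, s ≠ u ++ '<' :: mm ++ '>' :: w2 := by
        intro u mm w2 hEq
        obtain ⟨u', m', w', heq, hl, hg⟩ := shrink mm u w2
        have hEq' : s = u' ++ '<' :: (m' ++ '>' :: w') := by rw [hEq, heq]; simp
        have hul : u'.length < i := by
          have := congrArg List.length hEq'
          simp at this
          omega
        have := hinv u' (m' ++ '>' :: w') hEq' hul
        simp [fmGoL_clean m' hl hg w'] at this
      have hsuv : s.takeWhile (fun c => c != '<') ++ s.dropWhile (fun c => c != '<') = s :=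
        List.takeWhile_append_dropWhile
      have hu : '<' ∉ s.takeWhile (fun c => c != '<') := by
        intro hmem
        have := List.mem_takeWhile_imp hmem
        simp at this
      have hv : '>' ∉ s.dropWhile (fun c => c != '<') := by
        cases hd : s.dropWhile (fun c => c != '<') with
        | nil => simp
        | cons c r =>
          have hne : s.dropWhile (fun c => c != '<') ≠ [] := by rw [hd]; simp
          have hph := List.head_dropWhile_not (fun c => c != '<') hne
          simp only [hd, List.head_cons] at hph
          have hcl : c = '<' := by simpa using hph
          intro hmem
          rcases List.mem_cons.mp hmem with h | h
          · rw [hcl] at h; exact absurd h (by decide)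
          · obtain ⟨a, b, hab⟩ := List.append_of_mem h
            have hseq : s = s.takeWhile (fun c => c != '<') ++ '<' :: (a ++ '>' :: b) := by
              conv_lhs => rw [← hsuv, hd, hcl, hab]
            refine hnd (s.takeWhile (fun c => c != '<')) a b ?_
            rw [show s.takeWhile (fun c => c != '<') ++ '<' :: a ++ '>' :: b
                = s.takeWhile (fun c => c != '<') ++ '<' :: (a ++ '>' :: b) by simp]
            exact hseq
      have hfin : finB (List.foldl stepB ([], []) s) = s := by
        conv_lhs => rw [← hsuv]
        rw [List.foldl_append, nolt_fold _ hu [], List.nil_append,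
          nogt_fold _ hv [] _, hsuv]
        rfl
      exact hfin.symm

-- ===== VERDICT (by name: the statement is the Claim_ definition above) =====
theorem removeSGML_spec : Claim_equal_removeSGML := by
  intro s _
  unfold Spec_removeSGML removeSGML removeSGML_alt
  rw [main_equiv ((s.toList.length + 1) * (s.toList.length + 1)) s.toList 0 le_rfl (by omega)
    (fun u r _ h => absurd h (by omega))]
  rfl
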